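-- pv_equiv track=rewrite | github.com/adam147g/introduction-to-computer-science | Exercises/set 3/zestaw - 3 - zad 17.py | create_sum
-- ===== SOURCE A (Python) =====
-- def convert_decimal_number(number, length):
--     array = [0] * length
--     for i in range(length - 1, -1, -1):
--         array[i] = number % 3
--         number //= 3
--     return array
--
-- def create_sum(T1, T2, idx):
--     summary = 0
--     result = convert_decimal_number(idx, len(T1))
--     for i in range(len(result)):
--         if result[i] == 0:
--             summary += T1[i]
--         elif result[i] == 1:
--             summary += T2[i]
--         elif result[i] == 2:
--             summary += (T1[i] + T2[i])
--     return summary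
-- ===== SOURCE B (Python) =====
-- def create_sum(T1, T2, idx):
--     L = len(T1)
--     r = idx % 3 ** L          # keep only the L low base-3 digits (handles negative idx)
--     q = 1
--     m = 0
--     while q <= r:             # q = 3**m: first power of 3 exceeding r
--         q *= 3
--         m += 1
--     k = L - m                 # the k leading digits are all 0: those positions take T1[i]
--     total = sum(T1[:k])
--     p = q
--     for i in range(k, L):     # most-significant-first over the m significant digits
--         p //= 3
--         d, r = divmod(r, p)   # next digit, 0..2
--         total += (T1[i] if d != 1 else 0) + (T2[i] if d else 0)
--     return total
-- ===== Notes on version B (the rewrite author's own statement) =====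
-- stated objective: alternative
-- what changed: B works most-significant-digit-first: it reduces idx modulo 3**len(T1) once, finds the first power of 3 exceeding the remainder to cover all leading-zero positions with one prefix sum of T1, then divmods the remainder by a shrinking power of 3 and adds T1[i]/T2[i] under arithmetic guards, instead of A's least-significant-first %3,//3 pass that materialises a digit array which a second forward scan consumes through an elif chain.
import Mathlib
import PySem

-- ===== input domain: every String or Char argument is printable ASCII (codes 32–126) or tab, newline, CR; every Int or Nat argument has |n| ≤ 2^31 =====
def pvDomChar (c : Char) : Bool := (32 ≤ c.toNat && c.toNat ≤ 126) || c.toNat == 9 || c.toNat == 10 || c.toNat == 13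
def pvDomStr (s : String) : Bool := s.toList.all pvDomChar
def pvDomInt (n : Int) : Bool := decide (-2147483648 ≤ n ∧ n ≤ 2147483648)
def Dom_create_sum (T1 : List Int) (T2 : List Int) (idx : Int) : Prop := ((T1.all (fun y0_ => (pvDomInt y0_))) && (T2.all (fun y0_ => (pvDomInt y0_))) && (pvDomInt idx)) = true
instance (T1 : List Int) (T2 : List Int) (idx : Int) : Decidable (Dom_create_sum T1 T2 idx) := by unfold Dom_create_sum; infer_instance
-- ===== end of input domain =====

-- B replaces A's least-significant-first digit array (built by %3,//3 and then scanned
-- forward through an elif chain) by a most-significant-first extraction: reduce idx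
-- modulo 3^len(T1) once, cover the leading-zero digit positions with one prefix sum of
-- T1, then divmod the running remainder by a shrinking power of 3 and add T1[i]/T2[i]
-- under arithmetic guards (objective: alternative).

-- ===== PORT A =====
-- port of convert_decimal_number: array = [0]*length; for i in range(length-1,-1,-1): array[i] = number % 3; number //= 3
def convert_decimal_number (number : Int) (length : Nat) : List Int :=
  ((PySem.List.pyRange ((length : Int) - 1) (-1) (-1)).foldl
    (fun (st : List Int × Int) i =>
      (PySem.List.pySetD st.1 i (PySem.Int.mod st.2 3), PySem.Int.floordiv st.2 3))
    (List.replicate length 0, number)).1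

-- summary = 0; result = convert_decimal_number(idx, len(T1)); forward scan of result.
-- T1[i]/result[i] are always in range; T2[i] is in range exactly on Pre_ (Python raises
-- IndexError otherwise), so the pyGetD default is never read on admitted inputs.
def create_sum (T1 : List Int) (T2 : List Int) (idx : Int) : Int :=
  let result := convert_decimal_number idx T1.length
  (List.range result.length).foldl
    (fun (summary : Int) (i : Nat) =>
      if PySem.List.pyGetD result (i : Int) 0 = 0 then summary + PySem.List.pyGetD T1 (i : Int) 0
      else if PySem.List.pyGetD result (i : Int) 0 = 1 then summary + PySem.List.pyGetD T2 (i : Int) 0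
      else if PySem.List.pyGetD result (i : Int) 0 = 2 then
        summary + (PySem.List.pyGetD T1 (i : Int) 0 + PySem.List.pyGetD T2 (i : Int) 0)
      else summary)
    0

-- ===== PORT B =====
-- Source B: r = idx % 3**L; a while loop finds q = 3**m, the first power of 3 exceeding r;
-- the k = L-m leading digits are 0, so sum(T1[:k]) covers them; then for i in range(k, L):
-- p //= 3; d, r = divmod(r, p); total += picks. divmod(r, p) = (r // p, r % p); p > 0 in
-- the loop so it never raises and floordiv/mod port it exactly. The while loop runs at
-- most L times (r < 3**L), so a fuel of L makes the port total and exact.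
-- T1[:k] is List.take (exact for a nonnegative bound); T2[i] (read only when d is
-- truthy) is in range exactly on Pre_.
def pvFirstPow : Nat → Int → Int → Nat → Int × Nat
  | 0, _, q, m => (q, m)
  | fuel + 1, r, q, m => if q ≤ r then pvFirstPow fuel r (3 * q) (m + 1) else (q, m)

def create_sum_alt (T1 : List Int) (T2 : List Int) (idx : Int) : Int :=
  let L := T1.length
  let r0 : Int := PySem.Int.mod idx (3 ^ L)
  let qm := pvFirstPow L r0 1 0
  let k := L - qm.2
  ((List.range' k (L - k)).foldl
    (fun (st : Int × Int × Int) (i : Nat) =>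
      let p := PySem.Int.floordiv st.1 3
      let d := PySem.Int.floordiv st.2.1 p
      let r := PySem.Int.mod st.2.1 p
      (p, r, st.2.2 + ((if d ≠ 1 then PySem.List.pyGetD T1 (i : Int) 0 else 0)
                      + (if d ≠ 0 then PySem.List.pyGetD T2 (i : Int) 0 else 0))))
    (qm.1, r0, (T1.take k).sum)).2.2

-- ===== PRECONDITION & SPEC =====
-- the i-th base-3 digit (most significant first) of idx truncated to L digits
def pvDigit (idx : Int) (L i : Nat) : Int :=
  PySem.Int.mod (PySem.Int.floordiv idx (3 ^ (L - 1 - i))) 3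

-- Pre_ excludes exactly the inputs where Python A raises IndexError: a position i whose
-- base-3 digit of idx is 1 or 2 (so T2[i] is read) with i ≥ len(T2).
def Pre_create_sum (T1 : List Int) (T2 : List Int) (idx : Int) : Prop :=
  ∀ i < T1.length, pvDigit idx T1.length i = 0 ∨ i < T2.length
instance (T1 : List Int) (T2 : List Int) (idx : Int) : Decidable (Pre_create_sum T1 T2 idx) := by
  unfold Pre_create_sum; infer_instance

def pvWitness_create_sum : List Int × List Int × Int := ([1, 2], [10, 20], 5)

def Spec_create_sum (T1 : List Int) (T2 : List Int) (idx : Int) (out : Int) : Prop := out = create_sum_alt T1 T2 idx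
instance (T1 : List Int) (T2 : List Int) (idx : Int) (out : Int) : Decidable (Spec_create_sum T1 T2 idx out) := by unfold Spec_create_sum; infer_instance

-- ===== CLAIM (what is proved, stated in full; the proofs are below) =====
def Claim_equal_create_sum : Prop := ∀ (T1 : List Int) (T2 : List Int) (idx : Int), Dom_create_sum T1 T2 idx → Pre_create_sum T1 T2 idx → Spec_create_sum T1 T2 idx (create_sum T1 T2 idx)

-- ===== LEMMAS AND PROOFS =====

-- the contribution of position i when its digit is d
def pvContrib (T1 T2 : List Int) (i : Nat) (d : Int) : Int :=
  if d = 0 then PySem.List.pyGetD T1 (i : Int) 0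
  else if d = 1 then PySem.List.pyGetD T2 (i : Int) 0
  else PySem.List.pyGetD T1 (i : Int) 0 + PySem.List.pyGetD T2 (i : Int) 0

theorem pvDigit_mem (idx : Int) (L i : Nat) :
    pvDigit idx L i = 0 ∨ pvDigit idx L i = 1 ∨ pvDigit idx L i = 2 := by
  unfold pvDigit
  rw [PySem.Int.mod_eq_emod_of_pos (by norm_num : (0:Int) < 3)]
  omega

theorem floordiv_floordiv (n : Int) (j : Nat) :
    PySem.Int.floordiv (PySem.Int.floordiv n 3) (3 ^ j) = PySem.Int.floordiv n (3 ^ (j + 1)) := by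
  rw [PySem.Int.floordiv_eq_ediv_of_pos (by norm_num : (0:Int) < 3),
      PySem.Int.floordiv_eq_ediv_of_pos (by positivity : (0:Int) < 3 ^ j),
      PySem.Int.floordiv_eq_ediv_of_pos (by positivity : (0:Int) < 3 ^ (j + 1)),
      Int.ediv_ediv_of_nonneg (by norm_num), pow_succ']

theorem pvDigit_step (n : Int) (k i : Nat) (hi : i < k) :
    pvDigit (PySem.Int.floordiv n 3) k i = pvDigit n (k + 1) i := by
  unfold pvDigit
  rw [floordiv_floordiv]
  have h : k - 1 - i + 1 = k + 1 - 1 - i := by omega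
  rw [h]

theorem pvDigit_last (n : Int) (k : Nat) :
    pvDigit n (k + 1) k = PySem.Int.mod n 3 := by
  unfold pvDigit
  have h : k + 1 - 1 - k = 0 := by omega
  rw [h, pow_zero, PySem.Int.floordiv_eq_ediv_of_pos (by norm_num : (0:Int) < 1), Int.ediv_one]

-- ---- B side ----

-- digit identity: the top digit of n mod 3^(e+1) is (n / 3^e) mod 3 (ediv/emod)
theorem emod_pow_ediv (n : Int) (e : Nat) :
    (n % 3 ^ (e + 1)) / 3 ^ e = (n / 3 ^ e) % 3 := by
  have hpe : (0:Int) < 3 ^ e := by positivity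
  have h1 : n % 3 ^ (e + 1) = n + (-(3 * (n / 3 ^ (e + 1)))) * 3 ^ e := by
    rw [Int.emod_def, pow_succ]; ring
  rw [h1, Int.add_mul_ediv_right _ _ (by positivity : (3:Int) ^ e ≠ 0)]
  have h2 : n / 3 ^ (e + 1) = n / 3 ^ e / 3 := by
    rw [Int.ediv_ediv_of_nonneg (by positivity : (0:Int) ≤ 3 ^ e), pow_succ]
  rw [h2, Int.emod_def]
  ring

theorem emod_pow_emod (n : Int) (a b : Nat) (h : b ≤ a) :
    n % 3 ^ a % 3 ^ b = n % 3 ^ b :=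
  Int.emod_emod_of_dvd n (pow_dvd_pow 3 h)

theorem pv_b_loop (T1 T2 : List Int) (idx : Int) (L : Nat) :
    ∀ (cnt j : Nat) (t : Int), j + cnt = L →
      (((List.range' j cnt).foldl
        (fun (st : Int × Int × Int) (i : Nat) =>
          (PySem.Int.floordiv st.1 3,
           PySem.Int.mod st.2.1 (PySem.Int.floordiv st.1 3),
           st.2.2 + ((if PySem.Int.floordiv st.2.1 (PySem.Int.floordiv st.1 3) ≠ 1
                      then PySem.List.pyGetD T1 (i : Int) 0 else 0)
                   + (if PySem.Int.floordiv st.2.1 (PySem.Int.floordiv st.1 3) ≠ 0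
                      then PySem.List.pyGetD T2 (i : Int) 0 else 0))))
        ((3:Int) ^ (L - j), idx % 3 ^ (L - j), t)).2.2)
      = t + ((List.range' j cnt).map (fun i => pvContrib T1 T2 i (pvDigit idx L i))).sum := by
  intro cnt
  induction cnt with
  | zero => intro j t _; simp
  | succ cnt ih =>
      intro j t hj
      have hLj : L - j = (L - 1 - j) + 1 := by omega
      rw [List.range'_succ, List.foldl_cons]
      simp only []
      have hpos : (0:Int) < 3 ^ ((L - 1 - j) + 1) := by positivity
      have hp : PySem.Int.floordiv ((3:Int) ^ (L - j)) 3 = 3 ^ (L - 1 - j) := by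
        rw [hLj, PySem.Int.floordiv_eq_ediv_of_pos (by norm_num : (0:Int) < 3), pow_succ,
          Int.mul_ediv_cancel _ (by norm_num : (3:Int) ≠ 0)]
      have hd : PySem.Int.floordiv (idx % 3 ^ (L - j)) (3 ^ (L - 1 - j)) = pvDigit idx L j := by
        rw [PySem.Int.floordiv_eq_ediv_of_pos (by positivity : (0:Int) < 3 ^ (L - 1 - j))]
        rw [hLj, emod_pow_ediv]
        unfold pvDigit
        rw [PySem.Int.floordiv_eq_ediv_of_pos (by positivity : (0:Int) < 3 ^ (L - 1 - j)),
          PySem.Int.mod_eq_emod_of_pos (by norm_num : (0:Int) < 3)]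
      have hr : PySem.Int.mod (idx % 3 ^ (L - j)) (3 ^ (L - 1 - j)) = idx % 3 ^ (L - (j + 1)) := by
        rw [PySem.Int.mod_eq_emod_of_pos (by positivity : (0:Int) < 3 ^ (L - 1 - j)),
          emod_pow_emod idx (L - j) (L - 1 - j) (by omega)]
        congr 2
        omega
      rw [hp, hd, hr]
      have hpe : (3:Int) ^ (L - 1 - j) = 3 ^ (L - (j + 1)) := by congr 1; omega
      rw [hpe, ih (j + 1) _ (by omega)]
      have hc : (if pvDigit idx L j ≠ 1 then PySem.List.pyGetD T1 (j : Int) 0 else 0)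
          + (if pvDigit idx L j ≠ 0 then PySem.List.pyGetD T2 (j : Int) 0 else 0)
          = pvContrib T1 T2 j (pvDigit idx L j) := by
        rcases pvDigit_mem idx L j with h | h | h <;> simp [pvContrib, h]
      rw [hc, List.map_cons, List.sum_cons]
      ring

theorem pvFirstPow_spec : ∀ (fuel : Nat) (r : Int) (a : Nat), 0 ≤ r → r < 3 ^ (a + fuel) →
    ∃ m : Nat, pvFirstPow fuel r (3 ^ a) a = (3 ^ m, m) ∧ r < 3 ^ m ∧ m ≤ a + fuel := by
  intro fuel
  induction fuel with
  | zero => intro r a _ hlt; exact ⟨a, rfl, by simpa using hlt, by omega⟩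
  | succ fuel ih =>
      intro r a h0 hlt
      rw [pvFirstPow]
      by_cases hle : (3:Int) ^ a ≤ r
      · rw [if_pos hle]
        have h3 : (3:Int) * 3 ^ a = 3 ^ (a + 1) := by rw [pow_succ]; ring
        rw [h3]
        obtain ⟨m, heq, hm1, hm2⟩ := ih r (a + 1) h0 (by
          have : a + 1 + fuel = a + (fuel + 1) := by omega
          rw [this]; exact hlt)
        exact ⟨m, heq, hm1, by omega⟩
      · rw [if_neg hle]
        exact ⟨a, rfl, by omega, by omega⟩

theorem pv_take_sum (T1 T2 : List Int) (idx : Int) (L k : Nat) (hk : k ≤ L) (hL : L = T1.length)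
    (hz : ∀ i < k, pvDigit idx L i = 0) :
    ((List.range' 0 k).map (fun i => pvContrib T1 T2 i (pvDigit idx L i))).sum
      = (T1.take k).sum := by
  have hmap : (List.range' 0 k).map (fun i => pvContrib T1 T2 i (pvDigit idx L i))
      = T1.take k := by
    apply List.ext_getElem
    · simp [hL] at hk ⊢; omega
    · intro i h1 h2
      simp only [List.getElem_map, List.getElem_range', List.getElem_take]
      have hik : i < k := by simpa using h1
      rw [show 0 + 1 * i = i by omega] at *
      rw [hz i hik]
      simp only [pvContrib]
      rw [PySem.List.pyGetD_natCast, List.getD_eq_getElem?_getD,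
        List.getElem?_eq_getElem (by omega), Option.getD_some]
      simp
  rw [hmap]

theorem create_sum_alt_eq_sum (T1 T2 : List Int) (idx : Int) :
    create_sum_alt T1 T2 idx =
      ((List.range T1.length).map (fun i => pvContrib T1 T2 i (pvDigit idx T1.length i))).sum := by
  unfold create_sum_alt
  simp only []
  set L := T1.length with hL
  have hposL : (0:Int) < 3 ^ L := by positivity
  rw [PySem.Int.mod_eq_emod_of_pos hposL]
  set r0 : Int := idx % 3 ^ L with hr0
  have h0r : 0 ≤ r0 := Int.emod_nonneg idx (by positivity)
  have hrlt : r0 < 3 ^ L := Int.emod_lt_of_pos idx hposL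
  obtain ⟨m, heq, hm1, hm2⟩ := pvFirstPow_spec L r0 0 h0r (by simpa using hrlt)
  have heq' : pvFirstPow L r0 1 0 = (3 ^ m, m) := by
    rw [show (1:Int) = (3:Int) ^ 0 by norm_num]; exact heq
  rw [heq']
  simp only []
  set k := L - m with hk
  have hmLk : m = L - k := by omega
  have hr0k : r0 = idx % 3 ^ (L - k) := by
    have h1 : idx % 3 ^ L % 3 ^ (L - k) = idx % 3 ^ (L - k) :=
      emod_pow_emod idx L (L - k) (by omega)
    rw [hr0, ← h1]
    exact (Int.emod_eq_of_lt h0r (by rw [← hmLk]; exact hm1)).symm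
  have hq : (3:Int) ^ m = 3 ^ (L - k) := by rw [hmLk]
  rw [hq]
  conv_lhs => rw [hr0k]
  rw [pv_b_loop T1 T2 idx L (L - k) k _ (by omega)]
  have hz : ∀ i < k, pvDigit idx L i = 0 := by
    intro i hik
    unfold pvDigit
    rw [PySem.Int.floordiv_eq_ediv_of_pos (by positivity : (0:Int) < 3 ^ (L - 1 - i)),
      PySem.Int.mod_eq_emod_of_pos (by norm_num : (0:Int) < 3)]
    rw [← emod_pow_ediv]
    have he1 : L - 1 - i + 1 ≤ L := by omega
    have hidx : idx % 3 ^ (L - 1 - i + 1) = r0 := by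
      rw [hr0, ← emod_pow_emod idx L (L - 1 - i + 1) he1]
      exact Int.emod_eq_of_lt h0r
        (lt_of_lt_of_le hm1 (pow_le_pow_right₀ (by norm_num : (1:Int) ≤ 3) (by omega)))
    rw [hidx]
    have : r0 < 3 ^ (L - 1 - i) := by
      calc r0 < 3 ^ m := hm1
        _ ≤ 3 ^ (L - 1 - i) := by
            apply pow_le_pow_right₀ (by norm_num : (1:Int) ≤ 3); omega
    rw [Int.ediv_eq_zero_of_lt h0r this]
  have hsum : (T1.take k).sum
      = ((List.range' 0 k).map (fun i => pvContrib T1 T2 i (pvDigit idx L i))).sum := by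
    rw [pv_take_sum T1 T2 idx L k (by omega) hL hz]
  rw [hsum]
  have hsplit : List.range' 0 L = List.range' 0 k ++ List.range' k (L - k) := by
    have h := @List.range'_append 0 k (L - k) 1
    simp only [one_mul, Nat.zero_add] at h
    rw [h, show k + (L - k) = L by omega]
  rw [List.range_eq_range', hsplit, List.map_append, List.sum_append]

-- ---- A side ----
theorem conv_getElem? (m : Nat) (arr : List Int) (n : Int) (hm : m ≤ arr.length) (j : Nat) :
    (((PySem.List.pyRange ((m : Int) - 1) (-1) (-1)).foldl
      (fun (st : List Int × Int) i =>
        (PySem.List.pySetD st.1 i (PySem.Int.mod st.2 3), PySem.Int.floordiv st.2 3))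
      (arr, n)).1)[j]? =
    if j < m then some (pvDigit n m j) else arr[j]? := by
  induction m generalizing arr n with
  | zero =>
      rw [PySem.List.pyRange_neg_one_eq_nil (by norm_num)]
      simp
  | succ m ih =>
      have hc : ((m + 1 : Nat) : Int) - 1 = (m : Int) := by push_cast; ring
      rw [hc, PySem.List.pyRange_neg_one_cons (by have := Int.natCast_nonneg m; omega)]
      rw [List.foldl_cons]
      simp only [PySem.List.pySetD_natCast]
      have harr : m ≤ (arr.set m (PySem.Int.mod n 3)).length := by
        rw [List.length_set]; omega
      rw [ih (arr.set m (PySem.Int.mod n 3)) (PySem.Int.floordiv n 3) harr]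
      by_cases h1 : j < m
      · rw [if_pos h1, if_pos (by omega), pvDigit_step n m j h1]
      · by_cases h2 : j = m
        · subst h2
          rw [if_neg h1, if_pos (by omega), List.getElem?_set_self (by omega), pvDigit_last]
        · rw [if_neg h1, if_neg (by omega), List.getElem?_set_ne (by omega)]

theorem conv_length (m : Nat) (arr : List Int) (n : Int) :
    (((PySem.List.pyRange ((m : Int) - 1) (-1) (-1)).foldl
      (fun (st : List Int × Int) i =>
        (PySem.List.pySetD st.1 i (PySem.Int.mod st.2 3), PySem.Int.floordiv st.2 3))
      (arr, n)).1).length = arr.length := by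
  induction m generalizing arr n with
  | zero =>
      rw [PySem.List.pyRange_neg_one_eq_nil (by norm_num)]
      rfl
  | succ m ih =>
      have hc : ((m + 1 : Nat) : Int) - 1 = (m : Int) := by push_cast; ring
      rw [hc, PySem.List.pyRange_neg_one_cons (by have := Int.natCast_nonneg m; omega)]
      rw [List.foldl_cons]
      simp only [PySem.List.pySetD_natCast]
      rw [ih, List.length_set]

theorem pv_foldl_add {α : Type} (l : List α) (g : α → Int) (c : Int) :
    l.foldl (fun s i => s + g i) c = c + (l.map g).sum := by
  induction l generalizing c with
  | nil => simp
  | cons x xs ih => simp [ih]; ring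

theorem create_sum_eq_sum (T1 T2 : List Int) (idx : Int) :
    create_sum T1 T2 idx =
      ((List.range T1.length).map (fun i => pvContrib T1 T2 i (pvDigit idx T1.length i))).sum := by
  have hlen : (convert_decimal_number idx T1.length).length = T1.length := by
    unfold convert_decimal_number
    rw [conv_length, List.length_replicate]
  have hget : ∀ j : Nat, j < T1.length →
      PySem.List.pyGetD (convert_decimal_number idx T1.length) (j : Int) 0 = pvDigit idx T1.length j := by
    intro j hj
    rw [PySem.List.pyGetD_natCast, List.getD_eq_getElem?_getD]
    unfold convert_decimal_number
    rw [conv_getElem? T1.length (List.replicate T1.length 0) idx (by simp) j, if_pos hj]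
    rfl
  unfold create_sum
  dsimp only
  rw [hlen]
  have hcong : (List.range T1.length).foldl
      (fun (summary : Int) (i : Nat) =>
        if PySem.List.pyGetD (convert_decimal_number idx T1.length) (i : Int) 0 = 0 then
          summary + PySem.List.pyGetD T1 (i : Int) 0
        else if PySem.List.pyGetD (convert_decimal_number idx T1.length) (i : Int) 0 = 1 then
          summary + PySem.List.pyGetD T2 (i : Int) 0
        else if PySem.List.pyGetD (convert_decimal_number idx T1.length) (i : Int) 0 = 2 then
          summary + (PySem.List.pyGetD T1 (i : Int) 0 + PySem.List.pyGetD T2 (i : Int) 0)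
        else summary) 0
      = (List.range T1.length).foldl
        (fun s i => s + pvContrib T1 T2 i (pvDigit idx T1.length i)) 0 := by
    apply PySem.List.foldl_congr_mem
    intro acc i hi
    rw [hget i (List.mem_range.mp hi)]
    rcases pvDigit_mem idx T1.length i with h | h | h <;>
      simp [pvContrib, h]
  rw [hcong, pv_foldl_add, zero_add]

-- ===== VERDICT (by name: the statement is the Claim_ definition above) =====
theorem create_sum_spec : Claim_equal_create_sum := by
  intro T1 T2 idx _ _
  unfold Spec_create_sum
  rw [create_sum_eq_sum, create_sum_alt_eq_sum]
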